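-- pv_equiv track=rewrite | github.com/miimmn/weather-project | pythonStudy/models/services/weatherService.py | cal_baseTime
-- ===== SOURCE A (Python) =====
-- def cal_baseTime(origin) :
--
--     base_time = ['0200', '0500', '0800', '1100', '1400', '1700', '2000', '2300']
--
--     for i, v in enumerate(base_time) :
--         if(origin < v) :
--             # 0200 보다 이전일 때 케이스 처리하기 (전날 2300)
--             if i == 0 :
--                 return base_time[-1]
--             else :
--                 return base_time[i-1]
--
--     return base_time[-1]
-- ===== SOURCE B (Python) =====
-- def cal_baseTime(origin):
--     # B: binary search for the greatest base time <= origin (same string comparison),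
--     # instead of A's linear scan; wraps to '2300' when origin precedes '0200'.
--     base_time = ['0200', '0500', '0800', '1100', '1400', '1700', '2000', '2300']
--     lo, hi = 0, len(base_time)
--     while lo < hi:
--         mid = (lo + hi) // 2
--         if origin < base_time[mid]:
--             hi = mid
--         else:
--             lo = mid + 1
--     return base_time[lo - 1] if lo != 0 else base_time[-1]
-- ===== Notes on version B (the rewrite author's own statement) =====
-- stated objective: alternative
-- what changed: Replaces A's linear enumerate-scan for the first base time greater than origin with a binary search (bisect_right-style) for the count of entries <= origin, indexing the predecessor directly.
import Mathlib
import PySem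

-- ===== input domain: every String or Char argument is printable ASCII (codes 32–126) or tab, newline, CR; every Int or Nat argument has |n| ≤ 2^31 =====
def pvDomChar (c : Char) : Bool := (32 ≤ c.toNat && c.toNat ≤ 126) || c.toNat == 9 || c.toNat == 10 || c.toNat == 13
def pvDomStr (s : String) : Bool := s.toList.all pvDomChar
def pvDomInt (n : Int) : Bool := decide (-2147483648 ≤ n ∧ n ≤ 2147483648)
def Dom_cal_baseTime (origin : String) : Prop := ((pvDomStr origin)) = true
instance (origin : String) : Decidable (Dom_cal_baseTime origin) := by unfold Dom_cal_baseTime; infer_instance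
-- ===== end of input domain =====

-- B replaces A's linear scan with a hand-written binary search over the same sorted list (objective: alternative).

-- ===== PORT A =====
-- A's for-loop over enumerate(base_time): returns `some r` at the first early return.
def calLoopA (origin : String) (base : List String) : List (Int × String) → Option String
  | [] => none
  | (i, v) :: rest =>
    if origin < v then
      some (if i == 0 then PySem.List.pyGetD base (-1) "" else PySem.List.pyGetD base (i - 1) "")
    else
      calLoopA origin base rest

def cal_baseTime (origin : String) : String :=
  let base := ["0200", "0500", "0800", "1100", "1400", "1700", "2000", "2300"]
  match calLoopA origin base (PySem.List.enumerate base 0) with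
  | some r => r
  | none => PySem.List.pyGetD base (-1) ""

-- ===== PORT B =====
-- B's while-loop: fuel = hi - lo at entry bounds the iterations (fuel-structured transliteration).
def bsLoopB (origin : String) (base : List String) : Nat → Nat → Nat → Nat
  | 0, lo, _ => lo
  | fuel + 1, lo, hi =>
    if lo < hi then
      let mid := (lo + hi) / 2
      if origin < PySem.List.pyGetD base (mid : Int) "" then
        bsLoopB origin base fuel lo mid
      else
        bsLoopB origin base fuel (mid + 1) hi
    else lo

def cal_baseTime_alt (origin : String) : String :=
  let base := ["0200", "0500", "0800", "1100", "1400", "1700", "2000", "2300"]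
  let lo := bsLoopB origin base base.length 0 base.length
  if lo ≠ 0 then PySem.List.pyGetD base ((lo : Int) - 1) "" else PySem.List.pyGetD base (-1) ""

-- ===== PRECONDITION & SPEC =====
def Spec_cal_baseTime (origin : String) (out : String) : Prop := out = cal_baseTime_alt origin
instance (origin : String) (out : String) : Decidable (Spec_cal_baseTime origin out) := by unfold Spec_cal_baseTime; infer_instance

-- ===== CLAIM (what is proved, stated in full; the proofs are below) =====
def Claim_equal_cal_baseTime : Prop := ∀ (origin : String), Dom_cal_baseTime origin → Spec_cal_baseTime origin (cal_baseTime origin)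

-- ===== LEMMAS AND PROOFS =====

-- ===== VERDICT (by name: the statement is the Claim_ definition above) =====
theorem cal_baseTime_spec : Claim_equal_cal_baseTime := by
  intro origin _
  unfold Spec_cal_baseTime cal_baseTime cal_baseTime_alt
  by_cases h0 : origin.toList < (['0','2','0','0'] : List Char)
  · have t1 : origin.toList < (['0','5','0','0'] : List Char) := lt_trans h0 (by decide)
    have t2 : origin.toList < (['0','8','0','0'] : List Char) := lt_trans h0 (by decide)
    have t4 : origin.toList < (['1','4','0','0'] : List Char) := lt_trans h0 (by decide)
    simp [calLoopA, bsLoopB, PySem.List.enumerate, PySem.List.pyGetD, PySem.List.pyGet?, PySem.List.pyIdx?, h0, t1, t2, t4]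
  · by_cases h1 : origin.toList < (['0','5','0','0'] : List Char)
    · have t2 : origin.toList < (['0','8','0','0'] : List Char) := lt_trans h1 (by decide)
      have t4 : origin.toList < (['1','4','0','0'] : List Char) := lt_trans h1 (by decide)
      simp [calLoopA, bsLoopB, PySem.List.enumerate, PySem.List.pyGetD, PySem.List.pyGet?, PySem.List.pyIdx?, h1, t2, t4, h0]
    · by_cases h2 : origin.toList < (['0','8','0','0'] : List Char)
      · have t4 : origin.toList < (['1','4','0','0'] : List Char) := lt_trans h2 (by decide)
        simp [calLoopA, bsLoopB, PySem.List.enumerate, PySem.List.pyGetD, PySem.List.pyGet?, PySem.List.pyIdx?, h2, t4, h0, h1]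
      · by_cases h3 : origin.toList < (['1','1','0','0'] : List Char)
        · have t4 : origin.toList < (['1','4','0','0'] : List Char) := lt_trans h3 (by decide)
          simp [calLoopA, bsLoopB, PySem.List.enumerate, PySem.List.pyGetD, PySem.List.pyGet?, PySem.List.pyIdx?, h3, t4, h0, h1, h2]
        · by_cases h4 : origin.toList < (['1','4','0','0'] : List Char)
          · simp [calLoopA, bsLoopB, PySem.List.enumerate, PySem.List.pyGetD, PySem.List.pyGet?, PySem.List.pyIdx?, h4, h0, h1, h2, h3]
          · by_cases h5 : origin.toList < (['1','7','0','0'] : List Char)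
            · have t6 : origin.toList < (['2','0','0','0'] : List Char) := lt_trans h5 (by decide)
              simp [calLoopA, bsLoopB, PySem.List.enumerate, PySem.List.pyGetD, PySem.List.pyGet?, PySem.List.pyIdx?, h5, t6, h0, h1, h2, h3, h4]
            · by_cases h6 : origin.toList < (['2','0','0','0'] : List Char)
              · simp [calLoopA, bsLoopB, PySem.List.enumerate, PySem.List.pyGetD, PySem.List.pyGet?, PySem.List.pyIdx?, h6, h0, h1, h2, h3, h4, h5]
              · by_cases h7 : origin.toList < (['2','3','0','0'] : List Char)
                · simp [calLoopA, bsLoopB, PySem.List.enumerate, PySem.List.pyGetD, PySem.List.pyGet?, PySem.List.pyIdx?, h7, h0, h1, h2, h3, h4, h5, h6]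
                · simp [calLoopA, bsLoopB, PySem.List.enumerate, PySem.List.pyGetD, PySem.List.pyGet?, PySem.List.pyIdx?, h0, h1, h2, h3, h4, h5, h6, h7]
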